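-- pv_equiv track=rewrite | github.com/2bt/adventofcode | 2021/03/p.py | f
-- ===== SOURCE A (Python) =====
-- def f(a, c):
--     p = 0
--     while len(a) > 1:
--         s = sum(w[p] == "1" for w in a)
--         keep = "01"[(s >= len(a) / 2) ^ c]
--         a = [w for w in a if w[p] == keep]
--         p += 1
--     return int(a[0], 2)
-- ===== SOURCE B (Python) =====
-- def f(a, c):
--     # Binary counting trie: one pass to build (count + last word through each node),
--     # then a single root-to-leaf walk chooses the rating path.
--     root = [0, "", None, None]  # [count, last word through, '0'-child, '1'-child]
--     for w in a:
--         node = root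
--         node[0] += 1
--         node[1] = w
--         for ch in w:
--             if ch == "0":
--                 if node[2] is None:
--                     node[2] = [0, "", None, None]
--                 node = node[2]
--             elif ch == "1":
--                 if node[3] is None:
--                     node[3] = [0, "", None, None]
--                 node = node[3]
--             else:
--                 break
--             node[0] += 1
--             node[1] = w
--     node = root
--     while node[0] > 1:
--         ones = node[3][0] if node[3] is not None else 0
--         node = node[3] if ((2 * ones >= node[0]) ^ c) else node[2]
--     return int(node[1], 2)
-- ===== Notes on version B (the rewrite author's own statement) =====
-- stated objective: alternative
-- what changed: A repeatedly re-filters the whole word list once per bit position; B builds a binary counting trie in one pass over the words and then picks the rating by a single root-to-leaf walk over node counts.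
import Mathlib
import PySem

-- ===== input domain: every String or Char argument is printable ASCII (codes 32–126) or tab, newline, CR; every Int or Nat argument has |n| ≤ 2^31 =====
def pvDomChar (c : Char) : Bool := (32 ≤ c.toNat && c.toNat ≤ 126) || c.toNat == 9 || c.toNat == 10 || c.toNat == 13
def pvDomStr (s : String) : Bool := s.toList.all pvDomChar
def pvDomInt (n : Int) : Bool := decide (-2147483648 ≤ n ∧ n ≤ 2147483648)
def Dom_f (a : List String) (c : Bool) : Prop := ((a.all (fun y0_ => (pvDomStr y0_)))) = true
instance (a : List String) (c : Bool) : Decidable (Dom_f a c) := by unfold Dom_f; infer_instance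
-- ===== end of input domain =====

-- B replaces A's repeated whole-list filtering passes by one counting trie built in a single
-- pass over the words plus a single root-to-leaf walk (objective: alternative decomposition).

-- ===== PORT A =====
-- A's while loop, ported as fuel recursion; the fuel (one more than the longest word) is a
-- totalization guard only: the Python loop either ends with len(a) <= 1 within that many
-- iterations or raises IndexError (w[p] past the end), which Pre_f excludes.
-- 's >= len(a) / 2' (exact float halving) is the integer test 2*s >= len(a).
def loopA (c : Bool) : Nat → List String → Nat → Int
  | fuel, a, p =>
    if 1 < a.length then
      match fuel with
      | 0 => 0
      | fuel' + 1 =>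
        let s := a.countP (fun w => PySem.Str.pyGet? w (p : Int) == some '1')
        let keep : Char := if ((decide (2 * s ≥ a.length)).xor c) then '1' else '0'
        loopA c fuel' (a.filter (fun w => PySem.Str.pyGet? w (p : Int) == some keep)) (p + 1)
    else ((PySem.List.pyGet? a 0).bind (fun w => PySem.Int.ofStrBase? w 2)).getD 0

def f (a : List String) (c : Bool) : Int :=
  loopA c (a.foldl (fun m w => max m w.toList.length) 0 + 1) a 0

-- ===== PORT B =====
-- node cnt w t0 t1 = Python's [count, last word through this node, '0'-child, '1'-child];
-- nil = None.
inductive PTrie where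
  | nil : PTrie
  | node : Nat → String → PTrie → PTrie → PTrie
deriving DecidableEq, Repr

def PTrie.cnt : PTrie → Nat
  | .nil => 0
  | .node n _ _ _ => n

def PTrie.c0 : PTrie → PTrie
  | .nil => .nil
  | .node _ _ t0 _ => t0

def PTrie.c1 : PTrie → PTrie
  | .nil => .nil
  | .node _ _ _ t1 => t1

-- insertion of word w along its chars (stops at the first non-'0'/'1' char, as B does)
def insAux (w : String) : PTrie → List Char → PTrie
  | t, [] => .node (t.cnt + 1) w t.c0 t.c1
  | t, ch :: rest =>
    if ch = '0' then .node (t.cnt + 1) w (insAux w t.c0 rest) t.c1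
    else if ch = '1' then .node (t.cnt + 1) w t.c0 (insAux w t.c1 rest)
    else .node (t.cnt + 1) w t.c0 t.c1

-- the walk: while node.count > 1 descend into the child chosen by the majority/minority rule
def walk (c : Bool) : PTrie → String
  | .nil => ""
  | .node cnt w t0 t1 =>
    if 1 < cnt then
      if ((decide (2 * t1.cnt ≥ cnt)).xor c) then walk c t1 else walk c t0
    else w

def f_alt (a : List String) (c : Bool) : Int :=
  let root := a.foldl (fun t w => insAux w t w.toList) (PTrie.node 0 "" PTrie.nil PTrie.nil)
  (PySem.Int.ofStrBase? (walk c root) 2).getD 0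

-- ===== PRECONDITION & SPEC =====
def grpCnt (a : List String) (q : List Char) : Nat :=
  (a.filter (fun w => q.isPrefixOf w.toList)).length

-- one selection step of A at bit position p along candidate word x: the surviving group
-- (words extending x.take p) still has >= 2 members, every member is long enough for w[p],
-- and x carries the bit the majority/minority rule picks there
def stepOK (a : List String) (c : Bool) (x : List Char) (p : Nat) : Bool :=
  decide (2 ≤ grpCnt a (x.take p)) &&
  a.all (fun w => !((x.take p).isPrefixOf w.toList) || decide (p < w.toList.length)) &&
  (x[p]? == some (if ((decide (2 * grpCnt a (x.take p ++ ['1']) ≥ grpCnt a (x.take p))).xor c)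
                  then '1' else '0'))

-- Pre_f characterises exactly the inputs on which the Python A returns normally: some word x
-- of a parses as a base-2 int and is the sole survivor after P selection steps, each step
-- having a big-enough, long-enough group and choosing x's next bit; otherwise A raises
-- (IndexError on empty list / overrun index, ValueError on the final int()).
def Pre_f (a : List String) (c : Bool) : Prop :=
  (a.any (fun x => (PySem.Int.ofStrBase? x 2).isSome &&
    (List.range (x.toList.length + 1)).any (fun P =>
      grpCnt a (x.toList.take P) == 1 &&
      (List.range P).all (fun p => stepOK a c x.toList p)))) = true

instance (a : List String) (c : Bool) : Decidable (Pre_f a c) := by unfold Pre_f; infer_instance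

def pvWitness_f : List String × Bool := (["0", "1"], true)

def Spec_f (a : List String) (c : Bool) (out : Int) : Prop := out = f_alt a c
instance (a : List String) (c : Bool) (out : Int) : Decidable (Spec_f a c out) := by unfold Spec_f; infer_instance

-- ===== CLAIM (what is proved, stated in full; the proofs are below) =====
def Claim_equal_f : Prop := ∀ (a : List String) (c : Bool), Dom_f a c → Pre_f a c → Spec_f a c (f a c)

-- ===== LEMMAS AND PROOFS =====

def PTrie.wrd : PTrie → String
  | .nil => ""
  | .node _ w _ _ => w

def descend : PTrie → List Char → PTrie
  | t, [] => t
  | t, ch :: q => descend (if ch = '0' then t.c0 else if ch = '1' then t.c1 else PTrie.nil) q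

def binQ (q : List Char) : Prop := ∀ ch ∈ q, ch = '0' ∨ ch = '1'

theorem descend_nil (q : List Char) : descend PTrie.nil q = PTrie.nil := by
  induction q with
  | nil => rfl
  | cons ch q ih => simpa [descend, PTrie.c0, PTrie.c1] using ih

theorem descend_append (t : PTrie) (q1 q2 : List Char) :
    descend t (q1 ++ q2) = descend (descend t q1) q2 := by
  induction q1 generalizing t with
  | nil => rfl
  | cons ch q ih => simp [descend, ih]

theorem cnt_insAux (w : String) (t : PTrie) (cs : List Char) :
    (insAux w t cs).cnt = t.cnt + 1 := by
  cases cs with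
  | nil => rfl
  | cons ch rest => simp [insAux]; split_ifs <;> rfl

theorem descend_insAux_cnt (q : List Char) (hq : binQ q) (t : PTrie) (cs : List Char) (w : String) :
    (descend (insAux w t cs) q).cnt = (descend t q).cnt + (if q.isPrefixOf cs then 1 else 0) := by
  induction q generalizing t cs with
  | nil => simp [descend, cnt_insAux, List.isPrefixOf]
  | cons b q' ih =>
    have hb := hq b (by simp)
    have hq' : binQ q' := fun ch h => hq ch (by simp [h])
    cases cs with
    | nil =>
      rcases hb with hb | hb <;> subst hb <;>
        simp [insAux, descend, PTrie.c0, PTrie.c1, List.isPrefixOf]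
    | cons ch cs' =>
      rcases hb with hb | hb <;> subst hb <;>
        by_cases h0 : ch = '0' <;> by_cases h1 : ch = '1' <;>
        simp_all [insAux, descend, PTrie.c0, PTrie.c1, List.isPrefixOf, ih hq'] <;>
        (try (intro hEq; subst hEq; simp_all))

theorem descend_insAux_wrd (q : List Char) (hq : binQ q) (t : PTrie) (cs : List Char) (w : String) :
    (descend (insAux w t cs) q).wrd = if q.isPrefixOf cs then w else (descend t q).wrd := by
  induction q generalizing t cs with
  | nil =>
    have hp : ([] : List Char).isPrefixOf cs = true := rfl
    cases cs with
    | nil => simp [insAux, descend, PTrie.wrd, hp]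
    | cons ch cs' =>
      simp only [insAux, descend, hp]
      split_ifs <;> simp [PTrie.wrd]
  | cons b q' ih =>
    have hb := hq b (by simp)
    have hq' : binQ q' := fun ch h => hq ch (by simp [h])
    cases cs with
    | nil =>
      rcases hb with hb | hb <;> subst hb <;>
        simp [insAux, descend, PTrie.c0, PTrie.c1, List.isPrefixOf]
    | cons ch cs' =>
      rcases hb with hb | hb <;> subst hb <;>
        by_cases h0 : ch = '0' <;> by_cases h1 : ch = '1' <;>
        simp_all [insAux, descend, PTrie.c0, PTrie.c1, List.isPrefixOf, ih hq'] <;>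
        (try (intro hEq; subst hEq; simp_all))

theorem foldl_cnt (q : List Char) (hq : binQ q) (a : List String) (t : PTrie) :
    (descend (a.foldl (fun t w => insAux w t w.toList) t) q).cnt = (descend t q).cnt + grpCnt a q := by
  induction a generalizing t with
  | nil => simp [grpCnt]
  | cons w a' ih =>
    simp only [List.foldl_cons]
    rw [ih, descend_insAux_cnt q hq]
    by_cases hpw : q.isPrefixOf w.toList <;> simp [grpCnt, hpw] <;> omega

theorem foldl_wrd (q : List Char) (hq : binQ q) (a : List String) (t : PTrie) :
    (descend (a.foldl (fun t w => insAux w t w.toList) t) q).wrd =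
      (a.filter (fun w => q.isPrefixOf w.toList)).getLastD (descend t q).wrd := by
  induction a generalizing t with
  | nil => simp
  | cons w a' ih =>
    simp only [List.foldl_cons]
    rw [ih, descend_insAux_wrd q hq]
    by_cases hpw : q.isPrefixOf w.toList
    · rw [if_pos hpw, List.filter_cons_of_pos (by simpa using hpw), List.getLastD_cons]
    · rw [if_neg hpw, List.filter_cons_of_neg (by simpa using hpw)]

theorem root0_descend_cnt (q : List Char) :
    (descend (PTrie.node 0 "" PTrie.nil PTrie.nil) q).cnt = 0 := by
  cases q with
  | nil => rfl
  | cons ch q => simp [descend, PTrie.c0, PTrie.c1, descend_nil, PTrie.cnt]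

theorem root0_descend_wrd (q : List Char) :
    (descend (PTrie.node 0 "" PTrie.nil PTrie.nil) q).wrd = "" := by
  cases q with
  | nil => rfl
  | cons ch q => simp [descend, PTrie.c0, PTrie.c1, descend_nil, PTrie.wrd]

-- build's subtree at path q: count and word
theorem build_cnt (q : List Char) (hq : binQ q) (a : List String) :
    (descend (a.foldl (fun t w => insAux w t w.toList) (PTrie.node 0 "" PTrie.nil PTrie.nil)) q).cnt
      = grpCnt a q := by
  rw [foldl_cnt q hq, root0_descend_cnt]; ring

theorem build_wrd (q : List Char) (hq : binQ q) (a : List String) :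
    (descend (a.foldl (fun t w => insAux w t w.toList) (PTrie.node 0 "" PTrie.nil PTrie.nil)) q).wrd
      = (a.filter (fun w => q.isPrefixOf w.toList)).getLastD "" := by
  rw [foldl_wrd q hq, root0_descend_wrd]

theorem prefix_snoc (q l : List Char) (b : Char) :
    q ++ [b] <+: l ↔ q <+: l ∧ l[q.length]? = some b := by
  constructor
  · intro hp
    have hq : q <+: l := (List.prefix_append q [b]).trans hp
    have ht : l.take ((q ++ [b]).length) = q ++ [b] := (List.prefix_iff_eq_take.mp hp).symm
    have hqt : l.take q.length = q := (List.prefix_iff_eq_take.mp hq).symm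
    rw [show (q ++ [b]).length = q.length + 1 by simp, List.take_add_one, hqt] at ht
    have hl : l[q.length]?.toList = [b] := List.append_cancel_left ht
    refine ⟨hq, ?_⟩
    cases hE : l[q.length]? <;> simp [hE] at hl <;> simp [hl]
  · rintro ⟨hp, hget⟩
    rw [List.prefix_iff_eq_take]
    rw [show (q ++ [b]).length = q.length + 1 by simp, List.take_add_one,
      ← List.prefix_iff_eq_take.mp hp, hget]
    rfl

theorem filter_trivial (a : List String) :
    a.filter (fun w => ([] : List Char).isPrefixOf w.toList) = a :=
  List.filter_eq_self.mpr (fun _ _ => rfl)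

theorem finish_one (a : List String) (c : Bool) (q : List Char) (hq : binQ q)
    (h1 : (a.filter (fun w => q.isPrefixOf w.toList)).length = 1) (fuel p : Nat) :
    loopA c fuel (a.filter (fun w => q.isPrefixOf w.toList)) p
      = (PySem.Int.ofStrBase? (walk c
          (descend (a.foldl (fun t w => insAux w t w.toList) (PTrie.node 0 "" PTrie.nil PTrie.nil)) q)) 2).getD 0 := by
  obtain ⟨x, hx⟩ := List.length_eq_one_iff.mp h1
  have hcnt : (descend (a.foldl (fun t w => insAux w t w.toList) (PTrie.node 0 "" PTrie.nil PTrie.nil)) q).cnt = 1 := by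
    rw [build_cnt q hq]; simpa [grpCnt] using h1
  have hwrd : (descend (a.foldl (fun t w => insAux w t w.toList) (PTrie.node 0 "" PTrie.nil PTrie.nil)) q).wrd = x := by
    rw [build_wrd q hq, hx]; rfl
  cases hT : descend (a.foldl (fun t w => insAux w t w.toList) (PTrie.node 0 "" PTrie.nil PTrie.nil)) q with
  | nil => rw [hT] at hcnt; simp [PTrie.cnt] at hcnt
  | node m wt t0 t1 =>
    rw [hT] at hcnt hwrd
    simp only [PTrie.cnt] at hcnt
    simp only [PTrie.wrd] at hwrd
    subst hcnt hwrd
    rw [hx]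
    cases fuel <;> simp [loopA, walk]

theorem filter_bit (a : List String) (q : List Char) (b : Char) (p : Nat) (hp : q.length = p) :
    (a.filter (fun w => q.isPrefixOf w.toList)).filter
        (fun w => PySem.Str.pyGet? w (p : Int) == some b)
      = a.filter (fun w => (q ++ [b]).isPrefixOf w.toList) := by
  subst hp
  rw [List.filter_filter]
  apply List.filter_congr
  intro w hw
  rw [Bool.eq_iff_iff]
  simp only [Bool.and_eq_true, beq_iff_eq, List.isPrefixOf_iff_prefix, prefix_snoc,
    PySem.Str.pyGet?_natCast]
  tauto

theorem loopA_step (c : Bool) (fuel : Nat) (a : List String) (p : Nat) (h : 1 < a.length) :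
    loopA c (fuel + 1) a p =
      loopA c fuel (a.filter (fun w => PySem.Str.pyGet? w (p : Int) ==
        some (if ((decide (2 * (a.countP (fun w => PySem.Str.pyGet? w (p : Int) == some '1')) ≥ a.length)).xor c)
              then '1' else '0'))) (p + 1) := by
  rw [loopA.eq_def]
  dsimp only
  rw [if_pos h]

theorem binq_take (a : List String) (c : Bool) (x : List Char) (P : Nat)
    (hsteps : ∀ p < P, stepOK a c x p = true) :
    ∀ p, p ≤ P → binQ (x.take p) := by
  intro p
  induction p with
  | zero => intro _ ch h; simp at h
  | succ p ihp =>
    intro hle ch hch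
    have hs := hsteps p (by omega)
    unfold stepOK at hs
    simp only [Bool.and_eq_true, beq_iff_eq] at hs
    obtain ⟨-, hget⟩ := hs
    rw [List.take_add_one, hget] at hch
    rcases List.mem_append.mp hch with h | h
    · exact ihp (by omega) ch h
    · simp only [Option.toList_some, List.mem_singleton] at h
      subst h
      by_cases hb : ((decide (2 * grpCnt a (x.take p ++ ['1']) ≥ grpCnt a (x.take p))).xor c) = true
      · rw [if_pos hb]; right; rfl
      · rw [if_neg hb]; left; rfl

theorem path_lemma (a : List String) (c : Bool) (x : List Char) (P : Nat)
    (hxa : ∃ w ∈ a, w.toList = x)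
    (hsteps : ∀ p < P, stepOK a c x p = true)
    (hone : grpCnt a (x.take P) = 1) :
    ∀ (d p fuel : Nat), p + d = P → d ≤ fuel →
      loopA c fuel (a.filter (fun w => (x.take p).isPrefixOf w.toList)) p
        = (PySem.Int.ofStrBase? (walk c
            (descend (a.foldl (fun t w => insAux w t w.toList) (PTrie.node 0 "" PTrie.nil PTrie.nil)) (x.take p))) 2).getD 0 := by
  intro d
  induction d with
  | zero =>
    intro p fuel hpd hf
    have hpP : p = P := by omega
    subst hpP
    exact finish_one a c (x.take p) (binq_take a c x p hsteps p le_rfl) hone fuel p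
  | succ d ihd =>
    intro p fuel hpd hf
    have hpP : p < P := by omega
    have hq : binQ (x.take p) := binq_take a c x P hsteps p (by omega)
    have hs := hsteps p hpP
    unfold stepOK at hs
    simp only [Bool.and_eq_true, beq_iff_eq, decide_eq_true_eq] at hs
    obtain ⟨⟨h2, -⟩, hget⟩ := hs
    have hxp : p < x.length := (List.getElem?_eq_some_iff.mp hget).1
    have hqlen : (x.take p).length = p := by
      rw [List.length_take]; omega
    have hgrp : 2 ≤ (a.filter (fun w => (x.take p).isPrefixOf w.toList)).length := h2
    cases fuel with
    | zero => omega
    | succ fuel' =>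
      rw [loopA_step c fuel' _ p hgrp]
      have hs1 : (a.filter (fun w => (x.take p).isPrefixOf w.toList)).countP
          (fun w => PySem.Str.pyGet? w (p : Int) == some '1') = grpCnt a (x.take p ++ ['1']) := by
        rw [List.countP_eq_length_filter, filter_bit a (x.take p) '1' p hqlen]; rfl
      rw [hs1]
      have hgq : grpCnt a (x.take p) = (a.filter (fun w => (x.take p).isPrefixOf w.toList)).length := rfl
      rw [← hgq]
      -- the subtree at x.take p
      have hTq : (descend (a.foldl (fun t w => insAux w t w.toList) (PTrie.node 0 "" PTrie.nil PTrie.nil)) (x.take p)).cnt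
          = grpCnt a (x.take p) := build_cnt (x.take p) hq a
      cases hT : descend (a.foldl (fun t w => insAux w t w.toList) (PTrie.node 0 "" PTrie.nil PTrie.nil)) (x.take p) with
      | nil => rw [hT] at hTq; simp [PTrie.cnt] at hTq; omega
      | node m wt t0 t1 =>
        rw [hT] at hTq
        simp only [PTrie.cnt] at hTq
        have ht1 : t1 = descend (a.foldl (fun t w => insAux w t w.toList) (PTrie.node 0 "" PTrie.nil PTrie.nil)) (x.take p ++ ['1']) := by
          rw [descend_append, hT]; simp [descend, PTrie.c1]
        have ht0 : t0 = descend (a.foldl (fun t w => insAux w t w.toList) (PTrie.node 0 "" PTrie.nil PTrie.nil)) (x.take p ++ ['0']) := by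
          rw [descend_append, hT]; simp [descend, PTrie.c0]
        have hc1 : t1.cnt = grpCnt a (x.take p ++ ['1']) := by
          rw [ht1, build_cnt _ (by
            intro ch h
            rcases List.mem_append.mp h with h | h
            · exact hq ch h
            · simp at h; subst h; right; rfl)]
        have hwalk : walk c (PTrie.node m wt t0 t1) =
            if ((decide (2 * grpCnt a (x.take p ++ ['1']) ≥ grpCnt a (x.take p))).xor c)
            then walk c t1 else walk c t0 := by
          rw [walk.eq_def]
          dsimp only
          rw [if_pos (by omega : 1 < m), hc1, hTq]
        rw [hwalk]
        obtain ⟨w0, hw0a, hw0x⟩ := hxa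
        cases hcond : (decide (2 * grpCnt a (x.take p ++ ['1']) ≥ grpCnt a (x.take p))).xor c
        · rw [if_neg (by simp), if_neg (by simp)]
          rw [filter_bit a (x.take p) '0' p hqlen]
          have htake : x.take (p + 1) = x.take p ++ ['0'] := by
            rw [List.take_add_one, hget, hcond]; rfl
          rw [← htake, ht0, ← htake]
          exact ihd (p + 1) fuel' (by omega) (by omega)
        · rw [if_pos rfl, if_pos rfl]
          rw [filter_bit a (x.take p) '1' p hqlen]
          have htake : x.take (p + 1) = x.take p ++ ['1'] := by
            rw [List.take_add_one, hget, hcond]; rfl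
          rw [← htake, ht1, ← htake]
          exact ihd (p + 1) fuel' (by omega) (by omega)

-- ===== VERDICT (by name: the statement is the Claim_ definition above) =====
theorem f_spec : Claim_equal_f := by
  unfold Claim_equal_f
  intro a c hdom hpre
  unfold Spec_f f f_alt
  unfold Pre_f at hpre
  simp only [List.any_eq_true, Bool.and_eq_true, beq_iff_eq, List.all_eq_true,
    List.mem_range] at hpre
  obtain ⟨x, hxa, hparse, P, hPlt, hone, hsteps⟩ := hpre
  have hfuel : P ≤ a.foldl (fun m w => max m w.toList.length) 0 + 1 := by
    have := (PySem.List.le_foldl_max_nat a (fun w => w.toList.length) 0).2 x hxa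
    omega
  have h := path_lemma a c x.toList P ⟨x, hxa, rfl⟩ hsteps hone P 0
    (a.foldl (fun m w => max m w.toList.length) 0 + 1) (by omega) hfuel
  rw [List.take_zero, filter_trivial] at h
  simpa [descend] using h
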